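-- pv_equiv track=rewrite | github.com/ava-orange-education/Ultimate-FinGPT-for-Financial-Analysis | Chapter_3/Scripts/Clean_data.py | maintain_semantics
-- ===== SOURCE A (Python) =====
-- def maintain_semantics(text):
--     semantic_terms = {
--         'increase': 'rise',
--         'growth': 'rise',
--         'decrease': 'fall',
--         'decline': 'fall'
--     }
--     for term, replacement in semantic_terms.items():
--         text = text.replace(term, replacement)
--     return text
-- ===== SOURCE B (Python) =====
-- def maintain_semantics(text):
--     replacements = (('increase', 'rise'), ('growth', 'rise'),
--                     ('decrease', 'fall'), ('decline', 'fall'))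
--     out = []
--     i = 0
--     n = len(text)
--     while i < n:
--         for term, rep in replacements:
--             if text.startswith(term, i):
--                 out.append(rep)
--                 i += len(term)
--                 break
--         else:
--             out.append(text[i])
--             i += 1
--     return ''.join(out)
-- ===== Notes on version B (the rewrite author's own statement) =====
-- stated objective: alternative
-- what changed: Replaces the four sequential whole-string str.replace passes with a single left-to-right scan that, at each position, tries the four terms in order and emits the replacement or the current character.
import Mathlib
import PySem

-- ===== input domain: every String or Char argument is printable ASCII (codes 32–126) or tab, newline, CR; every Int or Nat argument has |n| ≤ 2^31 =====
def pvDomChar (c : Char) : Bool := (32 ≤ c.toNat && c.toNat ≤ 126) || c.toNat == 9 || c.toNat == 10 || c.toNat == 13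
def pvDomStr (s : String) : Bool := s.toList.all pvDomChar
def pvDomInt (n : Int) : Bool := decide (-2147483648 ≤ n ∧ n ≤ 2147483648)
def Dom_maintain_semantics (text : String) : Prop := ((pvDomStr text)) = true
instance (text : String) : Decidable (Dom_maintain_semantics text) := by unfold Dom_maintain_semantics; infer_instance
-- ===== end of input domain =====

-- B replaces A's four sequential whole-string replace passes by one left-to-right scan
-- that tries the four terms at each position (objective: alternative; same results).

-- ===== PORT A =====
-- the dict literal of A, hoisted as a helper (insertion order kept)
def pvSemanticTerms : PySem.Dict String String :=
  ((((PySem.Dict.empty).insert "increase" "rise").insert "growth" "rise").insert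
      "decrease" "fall").insert "decline" "fall"

def maintain_semantics (text : String) : String :=
  pvSemanticTerms.items.foldl (fun t p => PySem.Str.replace t p.1 p.2) text

-- ===== PORT B =====
-- Source B's while loop over positions: at each position try the four (term, rep) pairs in
-- order (the for/else unrolled), emit rep and skip len(term), else emit the char and step.
def pvScan : List Char → List Char
  | [] => []
  | c :: t =>
    if "increase".toList.isPrefixOf (c :: t) then "rise".toList ++ pvScan ((c :: t).drop 8)
    else if "growth".toList.isPrefixOf (c :: t) then "rise".toList ++ pvScan ((c :: t).drop 6)
    else if "decrease".toList.isPrefixOf (c :: t) then "fall".toList ++ pvScan ((c :: t).drop 8)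
    else if "decline".toList.isPrefixOf (c :: t) then "fall".toList ++ pvScan ((c :: t).drop 7)
    else c :: pvScan t
termination_by l => l.length
decreasing_by all_goals simp

def maintain_semantics_alt (text : String) : String :=
  String.ofList (pvScan text.toList)

-- ===== PRECONDITION & SPEC =====
def Spec_maintain_semantics (text : String) (out : String) : Prop := out = maintain_semantics_alt text
instance (text : String) (out : String) : Decidable (Spec_maintain_semantics text out) := by unfold Spec_maintain_semantics; infer_instance

-- ===== CLAIM (what is proved, stated in full; the proofs are below) =====
def Claim_equal_maintain_semantics : Prop := ∀ (text : String), Dom_maintain_semantics text → Spec_maintain_semantics text (maintain_semantics text)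

-- ===== LEMMAS AND PROOFS =====

-- A proof-side model of PySem.Chars.replace for a nonempty pattern (no fuel, no accumulator).
def repC (o0 : Char) (old' new : List Char) : List Char → List Char
  | [] => []
  | c :: t =>
    if (o0 :: old').isPrefixOf (c :: t) then new ++ repC o0 old' new (t.drop old'.length)
    else c :: repC o0 old' new t
termination_by l => l.length
decreasing_by all_goals simp

theorem go_eq (o0 : Char) (old' new : List Char) :
    ∀ fuel l acc, l.length ≤ fuel →
      PySem.Chars.replace.go (o0 :: old') new fuel l acc = acc.reverse ++ repC o0 old' new l := by
  intro fuel
  induction fuel with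
  | zero =>
    intro l acc h
    have : l = [] := by simpa using h
    subst this; simp [PySem.Chars.replace.go, repC]
  | succ n ih =>
    intro l acc h
    match l with
    | [] => simp [PySem.Chars.replace.go, repC]
    | c :: t =>
      rw [PySem.Chars.replace.go]
      by_cases hp : (o0 :: old').isPrefixOf (c :: t)
      · rw [if_pos hp, ih _ _ (by simp at h ⊢; omega)]
        rw [repC, if_pos hp]; simp
      · rw [if_neg hp, ih _ _ (by simp at h; omega)]
        rw [repC, if_neg hp]; simp

theorem replace_eq (o0 : Char) (old' new : List Char) (s : List Char) :
    PySem.Chars.replace s (o0 :: old') new = repC o0 old' new s := by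
  rw [PySem.Chars.replace]
  simp [go_eq o0 old' new s.length s [] le_rfl]

-- the four replace passes of A, on char lists
def pr1 : List Char → List Char := repC 'i' ['n','c','r','e','a','s','e'] ['r','i','s','e']
def pr2 : List Char → List Char := repC 'g' ['r','o','w','t','h'] ['r','i','s','e']
def pr3 : List Char → List Char := repC 'd' ['e','c','r','e','a','s','e'] ['f','a','l','l']
def pr4 : List Char → List Char := repC 'd' ['e','c','l','i','n','e'] ['f','a','l','l']

-- replacements never recreate a later pattern: a suffix-of-pattern prefix survives repC backwards
theorem pres (o0 : Char) (old' new pat2 : List Char)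
    (H : ∀ q, q ∈ pat2.tails → q ≠ [] → ∀ ys, ¬ q <+: (new ++ ys)) :
    ∀ xs q, q ∈ pat2.tails → q <+: repC o0 old' new xs → q <+: xs := by
  intro xs
  induction xs using repC.induct o0 old' with
  | case1 => intro q _ h; simpa [repC] using h
  | case2 c t hp ih =>
    intro q hq h
    rw [repC, if_pos hp] at h
    rcases q with _ | ⟨a, q'⟩
    · exact List.nil_prefix
    · exact absurd h (H _ hq (by simp) _)
  | case3 c t hp ih =>
    intro q hq h
    rw [repC, if_neg hp] at h
    rcases q with _ | ⟨a, q'⟩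
    · exact List.nil_prefix
    · rw [List.cons_prefix_cons] at h ⊢
      refine ⟨h.1, ih q' ?_ h.2⟩
      rw [List.mem_tails] at hq ⊢
      exact (List.suffix_cons a q').trans hq

-- the H side conditions, one per (replacement, later pattern) pair actually used
theorem H_growth_rise : ∀ q, q ∈ (['g','r','o','w','t','h'] : List Char).tails → q ≠ [] →
    ∀ ys, ¬ q <+: (['r','i','s','e'] ++ ys) := by
  intro q hq hne ys hpre
  have h2 := hpre.take 2
  rw [List.take_append_of_le_length (by simp)] at h2
  fin_cases hq <;> simp_all [List.cons_prefix_cons]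

theorem H_decrease_rise : ∀ q, q ∈ (['d','e','c','r','e','a','s','e'] : List Char).tails → q ≠ [] →
    ∀ ys, ¬ q <+: (['r','i','s','e'] ++ ys) := by
  intro q hq hne ys hpre
  have h2 := hpre.take 2
  rw [List.take_append_of_le_length (by simp)] at h2
  fin_cases hq <;> simp_all [List.cons_prefix_cons]

theorem H_decline_rise : ∀ q, q ∈ (['d','e','c','l','i','n','e'] : List Char).tails → q ≠ [] →
    ∀ ys, ¬ q <+: (['r','i','s','e'] ++ ys) := by
  intro q hq hne ys hpre
  have h2 := hpre.take 2
  rw [List.take_append_of_le_length (by simp)] at h2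
  fin_cases hq <;> simp_all [List.cons_prefix_cons]

theorem H_decline_fall : ∀ q, q ∈ (['d','e','c','l','i','n','e'] : List Char).tails → q ≠ [] →
    ∀ ys, ¬ q <+: (['f','a','l','l'] ++ ys) := by
  intro q hq hne ys hpre
  have h2 := hpre.take 2
  rw [List.take_append_of_le_length (by simp)] at h2
  fin_cases hq <;> simp_all [List.cons_prefix_cons]

-- distribution of later passes over emitted replacements / earlier patterns (concrete mismatches)
theorem pr2_rise (X : List Char) : pr2 (['r','i','s','e'] ++ X) = ['r','i','s','e'] ++ pr2 X := by
  simp [pr2, repC, List.isPrefixOf]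
theorem pr3_rise (X : List Char) : pr3 (['r','i','s','e'] ++ X) = ['r','i','s','e'] ++ pr3 X := by
  simp [pr3, repC, List.isPrefixOf]
theorem pr4_rise (X : List Char) : pr4 (['r','i','s','e'] ++ X) = ['r','i','s','e'] ++ pr4 X := by
  simp [pr4, repC, List.isPrefixOf]
theorem pr4_fall (X : List Char) : pr4 (['f','a','l','l'] ++ X) = ['f','a','l','l'] ++ pr4 X := by
  simp [pr4, repC, List.isPrefixOf]
theorem pr1_growth (X : List Char) : pr1 (['g','r','o','w','t','h'] ++ X) = ['g','r','o','w','t','h'] ++ pr1 X := by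
  simp [pr1, repC, List.isPrefixOf]
theorem pr1_decrease (X : List Char) : pr1 (['d','e','c','r','e','a','s','e'] ++ X) = ['d','e','c','r','e','a','s','e'] ++ pr1 X := by
  simp [pr1, repC, List.isPrefixOf]
theorem pr2_decrease (X : List Char) : pr2 (['d','e','c','r','e','a','s','e'] ++ X) = ['d','e','c','r','e','a','s','e'] ++ pr2 X := by
  simp [pr2, repC, List.isPrefixOf]
theorem pr1_decline (X : List Char) : pr1 (['d','e','c','l','i','n','e'] ++ X) = ['d','e','c','l','i','n','e'] ++ pr1 X := by
  simp [pr1, repC, List.isPrefixOf]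
theorem pr2_decline (X : List Char) : pr2 (['d','e','c','l','i','n','e'] ++ X) = ['d','e','c','l','i','n','e'] ++ pr2 X := by
  simp [pr2, repC, List.isPrefixOf]
theorem pr3_decline (X : List Char) : pr3 (['d','e','c','l','i','n','e'] ++ X) = ['d','e','c','l','i','n','e'] ++ pr3 X := by
  simp [pr3, repC, List.isPrefixOf]
-- matching heads
theorem pr1_increase (X : List Char) : pr1 (['i','n','c','r','e','a','s','e'] ++ X) = ['r','i','s','e'] ++ pr1 X := by
  simp [pr1, repC, List.isPrefixOf]
theorem pr2_growth (X : List Char) : pr2 (['g','r','o','w','t','h'] ++ X) = ['r','i','s','e'] ++ pr2 X := by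
  simp [pr2, repC, List.isPrefixOf]
theorem pr3_decrease (X : List Char) : pr3 (['d','e','c','r','e','a','s','e'] ++ X) = ['f','a','l','l'] ++ pr3 X := by
  simp [pr3, repC, List.isPrefixOf]
theorem pr4_decline (X : List Char) : pr4 (['d','e','c','l','i','n','e'] ++ X) = ['f','a','l','l'] ++ pr4 X := by
  simp [pr4, repC, List.isPrefixOf]

-- the core equivalence on char lists: four passes = one scan
theorem passes_eq_scan : ∀ l : List Char, pr4 (pr3 (pr2 (pr1 l))) = pvScan l := by
  intro l
  induction l using pvScan.induct with
  | case1 => simp [pr1, pr2, pr3, pr4, repC, pvScan]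
  | case2 c t h1 ih =>
    rw [List.isPrefixOf_iff_prefix] at h1
    obtain ⟨rest, hrest⟩ := h1
    have hct : c :: t = ['i','n','c','r','e','a','s','e'] ++ rest := by
      simpa using hrest.symm
    have hdrop : (c :: t).drop 8 = rest := by rw [hct]; simp
    rw [pvScan, if_pos (by rw [List.isPrefixOf_iff_prefix, hct]; exact ⟨rest, by simp⟩)]
    rw [hct, pr1_increase, pr2_rise, pr3_rise, pr4_rise]
    have htail : t = ['n','c','r','e','a','s','e'] ++ rest := by
      have h := hct
      rw [show (['i','n','c','r','e','a','s','e'] : List Char) ++ rest = 'i' :: (['n','c','r','e','a','s','e'] ++ rest) from rfl] at h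
      exact (List.cons_eq_cons.mp h).2
    have ihr : pr4 (pr3 (pr2 (pr1 rest))) = pvScan rest := by
      rw [htail] at ih; simpa using ih
    rw [hct] at hdrop
    rw [hdrop, ihr]; rfl
  | case3 c t h1 h2 ih =>
    rw [List.isPrefixOf_iff_prefix] at h2
    obtain ⟨rest, hrest⟩ := h2
    have hct : c :: t = ['g','r','o','w','t','h'] ++ rest := by simpa using hrest.symm
    have hdrop : (c :: t).drop 6 = rest := by rw [hct]; simp
    rw [pvScan, if_neg h1,
      if_pos (by rw [List.isPrefixOf_iff_prefix, hct]; exact ⟨rest, by simp⟩)]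
    rw [hct, pr1_growth, pr2_growth, pr3_rise, pr4_rise]
    have htail : t = ['r','o','w','t','h'] ++ rest := by
      have h := hct
      rw [show (['g','r','o','w','t','h'] : List Char) ++ rest = 'g' :: (['r','o','w','t','h'] ++ rest) from rfl] at h
      exact (List.cons_eq_cons.mp h).2
    have ihr : pr4 (pr3 (pr2 (pr1 rest))) = pvScan rest := by
      rw [htail] at ih; simpa using ih
    rw [hct] at hdrop
    rw [hdrop, ihr]; rfl
  | case4 c t h1 h2 h3 ih =>
    rw [List.isPrefixOf_iff_prefix] at h3
    obtain ⟨rest, hrest⟩ := h3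
    have hct : c :: t = ['d','e','c','r','e','a','s','e'] ++ rest := by simpa using hrest.symm
    have hdrop : (c :: t).drop 8 = rest := by rw [hct]; simp
    rw [pvScan, if_neg h1, if_neg h2,
      if_pos (by rw [List.isPrefixOf_iff_prefix, hct]; exact ⟨rest, by simp⟩)]
    rw [hct, pr1_decrease, pr2_decrease, pr3_decrease, pr4_fall]
    have htail : t = ['e','c','r','e','a','s','e'] ++ rest := by
      have h := hct
      rw [show (['d','e','c','r','e','a','s','e'] : List Char) ++ rest = 'd' :: (['e','c','r','e','a','s','e'] ++ rest) from rfl] at h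
      exact (List.cons_eq_cons.mp h).2
    have ihr : pr4 (pr3 (pr2 (pr1 rest))) = pvScan rest := by
      rw [htail] at ih; simpa using ih
    rw [hct] at hdrop
    rw [hdrop, ihr]; rfl
  | case5 c t h1 h2 h3 h4 ih =>
    rw [List.isPrefixOf_iff_prefix] at h4
    obtain ⟨rest, hrest⟩ := h4
    have hct : c :: t = ['d','e','c','l','i','n','e'] ++ rest := by simpa using hrest.symm
    have hdrop : (c :: t).drop 7 = rest := by rw [hct]; simp
    rw [pvScan, if_neg h1, if_neg h2, if_neg h3,
      if_pos (by rw [List.isPrefixOf_iff_prefix, hct]; exact ⟨rest, by simp⟩)]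
    rw [hct, pr1_decline, pr2_decline, pr3_decline, pr4_decline]
    have htail : t = ['e','c','l','i','n','e'] ++ rest := by
      have h := hct
      rw [show (['d','e','c','l','i','n','e'] : List Char) ++ rest = 'd' :: (['e','c','l','i','n','e'] ++ rest) from rfl] at h
      exact (List.cons_eq_cons.mp h).2
    have ihr : pr4 (pr3 (pr2 (pr1 rest))) = pvScan rest := by
      rw [htail] at ih; simpa using ih
    rw [hct] at hdrop
    rw [hdrop, ihr]; rfl
  | case6 c t h1 h2 h3 h4 ih =>
    have e1 : pr1 (c :: t) = c :: pr1 t := by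
      rw [pr1, repC, if_neg (by simpa using h1)]
    have hmem2 : (['g','r','o','w','t','h'] : List Char) ∈ (['g','r','o','w','t','h'] : List Char).tails := by
      rw [List.mem_tails]
    have hmem3 : (['d','e','c','r','e','a','s','e'] : List Char) ∈ (['d','e','c','r','e','a','s','e'] : List Char).tails := by
      rw [List.mem_tails]
    have hmem4 : (['d','e','c','l','i','n','e'] : List Char) ∈ (['d','e','c','l','i','n','e'] : List Char).tails := by
      rw [List.mem_tails]
    have h2' : ¬ (['g','r','o','w','t','h'] : List Char) <+: (c :: t) := by
      simpa [List.isPrefixOf_iff_prefix] using h2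
    have hg : ¬ (['g','r','o','w','t','h'] : List Char) <+: pr1 (c :: t) := fun h =>
      h2' (pres _ _ _ _ H_growth_rise (c :: t) _ hmem2 h)
    have e2 : pr2 (pr1 (c :: t)) = c :: pr2 (pr1 t) := by
      rw [e1] at hg ⊢
      rw [pr2, repC, if_neg (by rw [List.isPrefixOf_iff_prefix]; exact hg)]
    have h3' : ¬ (['d','e','c','r','e','a','s','e'] : List Char) <+: (c :: t) := by
      simpa [List.isPrefixOf_iff_prefix] using h3
    have hd3 : ¬ (['d','e','c','r','e','a','s','e'] : List Char) <+: pr2 (pr1 (c :: t)) := fun h =>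
      h3' (pres _ _ _ _ H_decrease_rise (c :: t) _ hmem3
          (pres _ _ _ _ H_decrease_rise (pr1 (c :: t)) _ hmem3 h))
    have e3 : pr3 (pr2 (pr1 (c :: t))) = c :: pr3 (pr2 (pr1 t)) := by
      rw [e2] at hd3 ⊢
      rw [pr3, repC, if_neg (by rw [List.isPrefixOf_iff_prefix]; exact hd3)]
    have h4' : ¬ (['d','e','c','l','i','n','e'] : List Char) <+: (c :: t) := by
      simpa [List.isPrefixOf_iff_prefix] using h4
    have hd4 : ¬ (['d','e','c','l','i','n','e'] : List Char) <+: pr3 (pr2 (pr1 (c :: t))) := fun h =>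
      h4' (pres _ _ _ _ H_decline_rise (c :: t) _ hmem4
          (pres _ _ _ _ H_decline_rise (pr1 (c :: t)) _ hmem4
            (pres _ _ _ _ H_decline_fall (pr2 (pr1 (c :: t))) _ hmem4 h)))
    have e4 : pr4 (pr3 (pr2 (pr1 (c :: t)))) = c :: pr4 (pr3 (pr2 (pr1 t))) := by
      rw [e3] at hd4 ⊢
      rw [pr4, repC, if_neg (by rw [List.isPrefixOf_iff_prefix]; exact hd4)]
    rw [e4, ih, pvScan, if_neg h1, if_neg h2, if_neg h3, if_neg h4]

-- A unfolded to the four nested replaces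
theorem A_unfold (text : String) :
    maintain_semantics text =
      PySem.Str.replace (PySem.Str.replace (PySem.Str.replace
        (PySem.Str.replace text "increase" "rise") "growth" "rise") "decrease" "fall")
        "decline" "fall" := by
  rfl

theorem A_toList (text : String) :
    (maintain_semantics text).toList = pr4 (pr3 (pr2 (pr1 text.toList))) := by
  rw [A_unfold]
  simp only [PySem.Str.toList_replace]
  rw [show "increase".toList = 'i' :: ['n','c','r','e','a','s','e'] from rfl,
    show "growth".toList = 'g' :: ['r','o','w','t','h'] from rfl,
    show "decrease".toList = 'd' :: ['e','c','r','e','a','s','e'] from rfl,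
    show "decline".toList = 'd' :: ['e','c','l','i','n','e'] from rfl,
    replace_eq, replace_eq, replace_eq, replace_eq]
  rfl

-- ===== VERDICT (by name: the statement is the Claim_ definition above) =====
theorem maintain_semantics_spec : Claim_equal_maintain_semantics := by
  intro text _
  unfold Spec_maintain_semantics maintain_semantics_alt
  have h := congrArg String.ofList ((A_toList text).trans (passes_eq_scan text.toList))
  simpa using h
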